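-- pv_equiv track=rewrite | github.com/yogeSHarma1386/py-yrs-commons | yrs_commons/dsa/usecase_based/array_misc.py | find_restaurant_location
-- ===== SOURCE A (Python) =====
-- from typing import List, Tuple, Optional
--
-- def find_restaurant_location(
--         residential_areas: List[int], commercial_areas: List[int]
-- ) -> int:
--     """Real-world example 2: Optimal Restaurant Location"""
--     # Find location that minimizes distance to both residential and commercial areas
--     left, right = 0, len(residential_areas) - 1
--     min_distance = float("inf")
--     optimal_location = -1
--
--     while left <= right:
--         mid = (left + right) // 2
--         res_dist = sum(abs(x - residential_areas[mid]) for x in residential_areas)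
--         com_dist = sum(abs(x - residential_areas[mid]) for x in commercial_areas)
--
--         total_dist = res_dist + com_dist
--         if total_dist < min_distance:
--             min_distance = total_dist
--             optimal_location = residential_areas[mid]
--
--         if res_dist > com_dist:
--             right = mid - 1
--         else:
--             left = mid + 1
--
--     return optimal_location
-- ===== SOURCE B (Python) =====
-- def _prefix(s):
--     p = [0]
--     for x in s:
--         p.append(p[-1] + x)
--     return p
--
--
-- def _bisect_left(s, t):
--     lo, hi = 0, len(s)
--     while lo < hi:
--         m = (lo + hi) // 2
--         if s[m] < t:
--             lo = m + 1
--         else: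
--             hi = m
--     return lo
--
--
-- def _abs_sum(t, s, p):
--     # sum(|x - t| for x in s) for sorted s with prefix sums p, in O(log n)
--     k = _bisect_left(s, t)
--     n = len(s)
--     return t * k - p[k] + (p[n] - p[k]) - t * (n - k)
--
--
-- def find_restaurant_location(residential_areas, commercial_areas):
--     sr = sorted(residential_areas)
--     sc = sorted(commercial_areas)
--     pr = _prefix(sr)
--     pc = _prefix(sc)
--     left, right = 0, len(residential_areas) - 1
--     min_distance = None
--     optimal_location = -1
--     while left <= right:
--         mid = (left + right) // 2
--         t = residential_areas[mid]
--         res_dist = _abs_sum(t, sr, pr)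
--         com_dist = _abs_sum(t, sc, pc)
--         total_dist = res_dist + com_dist
--         if min_distance is None or total_dist < min_distance:
--             min_distance = total_dist
--             optimal_location = t
--         if res_dist > com_dist:
--             right = mid - 1
--         else:
--             left = mid + 1
--     return optimal_location
-- ===== Notes on version B (the rewrite author's own statement) =====
-- stated objective: faster
-- what changed: B keeps A's binary-search loop but precomputes sorted copies of both lists with prefix-sum arrays, so each iteration's absolute-distance sums are answered by an O(log) bisect + prefix-sum query instead of A's full O(n+m) scans.
import Mathlib
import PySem

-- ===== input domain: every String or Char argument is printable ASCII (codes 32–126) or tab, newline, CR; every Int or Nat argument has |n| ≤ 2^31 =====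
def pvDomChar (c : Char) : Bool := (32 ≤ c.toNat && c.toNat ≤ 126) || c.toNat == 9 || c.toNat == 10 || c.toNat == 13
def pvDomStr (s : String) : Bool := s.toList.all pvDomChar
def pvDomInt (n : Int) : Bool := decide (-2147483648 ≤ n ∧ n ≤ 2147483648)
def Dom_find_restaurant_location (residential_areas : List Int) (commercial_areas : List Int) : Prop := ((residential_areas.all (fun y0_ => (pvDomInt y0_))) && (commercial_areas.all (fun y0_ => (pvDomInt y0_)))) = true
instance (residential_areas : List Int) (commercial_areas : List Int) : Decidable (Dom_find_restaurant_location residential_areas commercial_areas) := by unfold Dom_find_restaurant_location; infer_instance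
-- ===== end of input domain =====

-- B replaces each O(n+m) absolute-distance scan inside A's binary-search loop by an
-- O(log) prefix-sum + bisect query over sorted copies built once up front (objective: faster).

-- ===== PORT A =====
-- float('inf') sentinel ported as Option Int: none = inf (only ever compared with '<')
def pvLtInf (td : Int) : Option Int → Bool
  | none => true
  | some v => decide (td < v)

def pvLoopA (res com : List Int) (left right : Int) (minD : Option Int) (opt : Int) : Int :=
  if h : left ≤ right then
    let mid := PySem.Int.floordiv (left + right) 2
    let t := PySem.List.pyGetD res mid 0   -- residential_areas[mid]; mid is always in range
    let rd := (res.map (fun x => |x - t|)).sum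
    let cd := (com.map (fun x => |x - t|)).sum
    let td := rd + cd
    let minD' := if pvLtInf td minD then some td else minD
    let opt' := if pvLtInf td minD then t else opt
    if rd > cd then pvLoopA res com left (mid - 1) minD' opt'
    else pvLoopA res com (mid + 1) right minD' opt'
  else opt
termination_by (right + 1 - left).toNat
decreasing_by
  · obtain ⟨_h1, _h2⟩ := PySem.Int.floordiv_two_mid_bounds h; omega
  · obtain ⟨_h1, _h2⟩ := PySem.Int.floordiv_two_mid_bounds h; omega

def find_restaurant_location (residential_areas : List Int) (commercial_areas : List Int) : Int :=
  pvLoopA residential_areas commercial_areas 0 (PySem.List.len residential_areas - 1) none (-1)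

-- ===== PORT B =====
-- p = [0]; for x in s: p.append(p[-1] + x)
def pvPrefix (s : List Int) : List Int :=
  s.foldl (fun p x => p ++ [PySem.List.pyGetD p (-1) 0 + x]) [0]

-- sum(|x - t| for x in s) for sorted s with prefix sums p (bisect_left is the
-- prelude-owned primitive PySem.List.bisectLeft)
def pvQuery (t : Int) (s p : List Int) : Int :=
  let k := PySem.List.bisectLeft s t
  let n := s.length
  t * (k : Int) - PySem.List.pyGetD p (k : Int) 0
    + (PySem.List.pyGetD p (n : Int) 0 - PySem.List.pyGetD p (k : Int) 0)
    - t * ((n : Int) - (k : Int))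

def pvIsNoneOrLt (m : Option Int) (td : Int) : Bool :=
  match m with
  | none => true
  | some v => decide (td < v)

def pvLoopB (res sr pr sc pc : List Int) (left right : Int) (minD : Option Int) (opt : Int) : Int :=
  if h : left ≤ right then
    let mid := PySem.Int.floordiv (left + right) 2
    let t := PySem.List.pyGetD res mid 0
    let rd := pvQuery t sr pr
    let cd := pvQuery t sc pc
    let td := rd + cd
    let minD' := if pvIsNoneOrLt minD td then some td else minD
    let opt' := if pvIsNoneOrLt minD td then t else opt
    if rd > cd then pvLoopB res sr pr sc pc left (mid - 1) minD' opt'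
    else pvLoopB res sr pr sc pc (mid + 1) right minD' opt'
  else opt
termination_by (right + 1 - left).toNat
decreasing_by
  · obtain ⟨_h1, _h2⟩ := PySem.Int.floordiv_two_mid_bounds h; omega
  · obtain ⟨_h1, _h2⟩ := PySem.Int.floordiv_two_mid_bounds h; omega

def find_restaurant_location_alt (residential_areas : List Int) (commercial_areas : List Int) : Int :=
  let sr := PySem.List.sorted residential_areas (fun x => x) false
  let sc := PySem.List.sorted commercial_areas (fun x => x) false
  pvLoopB residential_areas sr (pvPrefix sr) sc (pvPrefix sc)
    0 (PySem.List.len residential_areas - 1) none (-1)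

-- ===== PRECONDITION & SPEC =====
def Spec_find_restaurant_location (residential_areas : List Int) (commercial_areas : List Int) (out : Int) : Prop := out = find_restaurant_location_alt residential_areas commercial_areas
instance (residential_areas : List Int) (commercial_areas : List Int) (out : Int) : Decidable (Spec_find_restaurant_location residential_areas commercial_areas out) := by unfold Spec_find_restaurant_location; infer_instance

-- ===== CLAIM (what is proved, stated in full; the proofs are below) =====
def Claim_equal_find_restaurant_location : Prop := ∀ (residential_areas : List Int) (commercial_areas : List Int), Dom_find_restaurant_location residential_areas commercial_areas → Spec_find_restaurant_location residential_areas commercial_areas (find_restaurant_location residential_areas commercial_areas)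

-- ===== LEMMAS AND PROOFS =====

-- proof-side tail of the prefix-sum list
def pvPfx : Int → List Int → List Int
  | _, [] => []
  | c, x :: xs => (c + x) :: pvPfx (c + x) xs

theorem pvPrefix_foldl (s : List Int) : ∀ (acc : List Int) (c : Int),
    s.foldl (fun p x => p ++ [PySem.List.pyGetD p (-1) 0 + x]) (acc ++ [c])
      = acc ++ c :: pvPfx c s := by
  induction s with
  | nil => intro acc c; simp [pvPfx]
  | cons x xs ih =>
    intro acc c
    simp only [List.foldl_cons, PySem.List.pyGetD_neg_one_append_singleton, pvPfx]
    have := ih (acc ++ [c]) (c + x)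
    simpa using this

theorem pvPfx_getD (s : List Int) : ∀ (c : Int) (k : Nat), k ≤ s.length →
    (c :: pvPfx c s).getD k 0 = c + (s.take k).sum := by
  induction s with
  | nil =>
    intro c k hk
    have hk0 : k = 0 := Nat.le_zero.mp hk
    subst hk0; simp
  | cons x xs ih =>
    intro c k hk
    cases k with
    | zero => simp
    | succ k =>
      simp only [pvPfx, List.getD_cons_succ, List.take_succ_cons, List.sum_cons]
      rw [ih (c + x) k (by simpa using hk)]; ring

theorem pvPrefix_getD (s : List Int) (k : Nat) (hk : k ≤ s.length) :
    PySem.List.pyGetD (pvPrefix s) (k : Int) 0 = (s.take k).sum := by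
  have h0 : pvPrefix s = [] ++ (0 : Int) :: pvPfx 0 s := by
    simpa [pvPrefix] using pvPrefix_foldl s [] 0
  rw [PySem.List.pyGetD_natCast, h0]
  simpa using pvPfx_getD s 0 k hk

theorem absSum_lt (t : Int) (l : List Int) (h : ∀ x ∈ l, x < t) :
    (l.map (fun x => |x - t|)).sum = t * l.length - l.sum := by
  induction l with
  | nil => simp
  | cons x xs ih =>
    have hx : x < t := h x (by simp)
    have : |x - t| = t - x := by rw [abs_of_neg (by omega)]; ring
    simp only [List.map_cons, List.sum_cons, this, ih (fun y hy => h y (by simp [hy])),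
      List.length_cons]
    push_cast; ring

theorem absSum_ge (t : Int) (l : List Int) (h : ∀ x ∈ l, t ≤ x) :
    (l.map (fun x => |x - t|)).sum = l.sum - t * l.length := by
  induction l with
  | nil => simp
  | cons x xs ih =>
    have hx : t ≤ x := h x (by simp)
    have : |x - t| = x - t := abs_of_nonneg (by omega)
    simp only [List.map_cons, List.sum_cons, this, ih (fun y hy => h y (by simp [hy])),
      List.length_cons]
    push_cast; ring

-- the prefix-sum query computes the naive absolute-distance sum
theorem pvQuery_eq (t : Int) (xs : List Int) :
    pvQuery t (PySem.List.sorted xs (fun x => x) false)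
      (pvPrefix (PySem.List.sorted xs (fun x => x) false))
      = (xs.map (fun x => |x - t|)).sum := by
  set s := PySem.List.sorted xs (fun x => x) false with hs
  have hsort : s.Pairwise (fun a b => a ≤ b) := by
    simpa using PySem.List.sorted_pairwise xs (fun x => x)
  obtain ⟨hk, hlt, hge⟩ := PySem.List.bisectLeft_spec s t hsort
  set k := PySem.List.bisectLeft s t with hkdef
  have hperm : (s.map (fun x => |x - t|)).Perm (xs.map (fun x => |x - t|)) :=
    (PySem.List.sorted_perm xs (fun x => x) false).map _
  rw [← hperm.sum_eq]
  have hsplit : s = s.take k ++ s.drop k := (List.take_append_drop k s).symm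
  have hlen_take : (s.take k).length = k := by simp [hk]
  have hlt' : ∀ x ∈ s.take k, x < t := by
    intro x hx
    obtain ⟨i, hi, hxi⟩ := List.getElem_of_mem hx
    rw [List.getElem_take] at hxi
    exact hxi ▸ hlt i (by omega) (by omega)
  have hge' : ∀ x ∈ s.drop k, t ≤ x := by
    intro x hx
    obtain ⟨i, hi, hxi⟩ := List.getElem_of_mem hx
    rw [List.getElem_drop] at hxi
    exact hxi ▸ hge (k + i) (by simp at hi; omega) (by omega)
  have hmap : (s.map (fun x => |x - t|)).sum
      = ((s.take k).map (fun x => |x - t|)).sum + ((s.drop k).map (fun x => |x - t|)).sum := by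
    conv_lhs => rw [hsplit]
    simp
  rw [hmap, absSum_lt t _ hlt', absSum_ge t _ hge']
  have hP1 : PySem.List.pyGetD (pvPrefix s) (k : Int) 0 = (s.take k).sum := pvPrefix_getD s k hk
  have hP2 : PySem.List.pyGetD (pvPrefix s) (s.length : Int) 0 = s.sum := by
    simpa using pvPrefix_getD s s.length le_rfl
  have hsum : s.sum = (s.take k).sum + (s.drop k).sum :=
    (List.sum_take_add_sum_drop s k).symm
  have e1 : (((s.take k).length : Nat) : Int) = (k : Int) := by rw [hlen_take]
  have e2 : (((s.drop k).length : Nat) : Int) = (s.length : Int) - (k : Int) := by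
    simp [List.length_drop]; omega
  have e3 : (s.drop k).sum = s.sum - (s.take k).sum := by omega
  rw [pvQuery, ← hkdef, hP1, hP2, e1, e2, e3]
  ring

theorem pvCond_eq (td : Int) (m : Option Int) : pvIsNoneOrLt m td = pvLtInf td m := by
  cases m <;> rfl

theorem pvLoopB_eq_pvLoopA_aux (res com : List Int) :
    ∀ (n : Nat) (left right : Int) (minD : Option Int) (opt : Int),
      (right + 1 - left).toNat ≤ n →
      pvLoopB res (PySem.List.sorted res (fun x => x) false)
        (pvPrefix (PySem.List.sorted res (fun x => x) false))
        (PySem.List.sorted com (fun x => x) false)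
        (pvPrefix (PySem.List.sorted com (fun x => x) false))
        left right minD opt = pvLoopA res com left right minD opt := by
  intro n
  induction n with
  | zero =>
    intro l r m o hle
    have h : ¬ l ≤ r := by omega
    rw [pvLoopA, pvLoopB]
    simp [h]
  | succ n ih =>
    intro l r m o hle
    rw [pvLoopA, pvLoopB]
    by_cases h : l ≤ r
    · simp only [dif_pos h, pvQuery_eq, pvCond_eq]
      obtain ⟨h1, h2⟩ := PySem.Int.floordiv_two_mid_bounds (lo := l) (hi := r) h
      split_ifs <;>
        first
          | exact ih l (PySem.Int.floordiv (l + r) 2 - 1) _ _ (by omega)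
          | exact ih (PySem.Int.floordiv (l + r) 2 + 1) r _ _ (by omega)
    · simp [h]

theorem pvLoopB_eq_pvLoopA (res com : List Int) (left right : Int) (minD : Option Int) (opt : Int) :
    pvLoopB res (PySem.List.sorted res (fun x => x) false)
      (pvPrefix (PySem.List.sorted res (fun x => x) false))
      (PySem.List.sorted com (fun x => x) false)
      (pvPrefix (PySem.List.sorted com (fun x => x) false))
      left right minD opt = pvLoopA res com left right minD opt :=
  pvLoopB_eq_pvLoopA_aux res com (right + 1 - left).toNat left right minD opt le_rfl

-- ===== VERDICT (by name: the statement is the Claim_ definition above) =====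
theorem find_restaurant_location_spec : Claim_equal_find_restaurant_location := by
  intro res com _
  unfold Spec_find_restaurant_location find_restaurant_location find_restaurant_location_alt
  exact (pvLoopB_eq_pvLoopA res com 0 (PySem.List.len res - 1) none (-1)).symm
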